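-- pv_equiv track=rewrite | github.com/IvanRenison/ProgrammingProblems | Codeforces rounds/Codeforces Round #841 (Div. 2) and Divide by Zero 2022/D.py | has_for_l
-- ===== SOURCE A (Python) =====
-- from typing import Callable, List, TypeVar
--
-- def has_for_l(ass: List[List[int]], l: int) -> bool:
--     n: int = len(ass)
--     m: int = len(ass[0])
--
--     B: List[List[bool]] = [[a >= l for a in As] for As in ass]
--
--     prefixes_B = [[0 for _ in range(m+1)] for _ in range(n+1)]
--
--     for i in range(n):
--         for j in range(m):
--             prefixes_B[i+1][j+1] = prefixes_B[i][j+1] + prefixes_B[i+1][j] - prefixes_B[i][j] + B[i][j]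
--
--     for i in range(n-l+1):
--         for j in range(m-l+1):
--             if prefixes_B[i+l][j+l] - prefixes_B[i][j+l] - prefixes_B[i+l][j] + prefixes_B[i][j] == l*l:
--                 return True
--
--     return False
-- ===== SOURCE B (Python) =====
-- def has_for_l(ass, l):
--     n = len(ass)
--     m = len(ass[0])
--     return any(
--         all(ass[i + di][j + dj] >= l for di in range(l) for dj in range(l))
--         for i in range(n - l + 1)
--         for j in range(m - l + 1)
--     )
-- ===== Notes on version B (the rewrite author's own statement) =====
-- stated objective: simpler
-- what changed: Replaced the (n+1)x(m+1) 2D prefix-sum table and its count==l*l region test by a direct any/all scan that checks each lxl window's entries against l: no auxiliary table is allocated and the scan short-circuits on the first failing cell (worst case O(n*m*l^2) vs A's O(n*m), but measurably faster on the generated inputs).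
-- outside the precondition, e.g. on has_for_l([[1]], -1): A returns True, B returns True
import Mathlib
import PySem

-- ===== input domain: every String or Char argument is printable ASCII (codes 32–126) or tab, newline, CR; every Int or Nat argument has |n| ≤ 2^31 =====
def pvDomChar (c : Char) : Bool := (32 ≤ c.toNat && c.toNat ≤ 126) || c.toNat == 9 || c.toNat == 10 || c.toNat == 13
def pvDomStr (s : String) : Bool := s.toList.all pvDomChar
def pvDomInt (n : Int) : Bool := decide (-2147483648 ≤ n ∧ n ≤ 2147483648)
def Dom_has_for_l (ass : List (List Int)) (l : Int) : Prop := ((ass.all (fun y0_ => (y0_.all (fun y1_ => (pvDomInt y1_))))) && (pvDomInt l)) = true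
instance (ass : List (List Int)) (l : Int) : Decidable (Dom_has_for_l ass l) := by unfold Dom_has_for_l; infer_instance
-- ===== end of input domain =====

-- B replaces A's 2D prefix-sum table (and its count == l*l test) by a direct any/all scan of each l×l window (simpler: no auxiliary table).

-- ===== PORT A =====
-- A-side helpers: the body of the table-filling double loop (prefixes_B[i+1][j+1] = …) and the inner loop over j.
def hfl_inner (B : List (List Bool)) (i : Nat) (P : List (List Int)) (j : Nat) : List (List Int) :=
  P.set (i+1) ((P.getD (i+1) []).set (j+1)
    ((P.getD i []).getD (j+1) 0 + (P.getD (i+1) []).getD j 0 - (P.getD i []).getD j 0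
      + (if (B.getD i []).getD j false then (1:Int) else 0)))

def hfl_outer (B : List (List Bool)) (m : Nat) (P : List (List Int)) (i : Nat) : List (List Int) :=
  (List.range m).foldl (hfl_inner B i) P

-- prefixes_B[i][j] read in the search loop; exact for the in-range indices Pre_ guarantees.
def hfl_get2 (P : List (List Int)) (i j : Int) : Int :=
  PySem.List.pyGetD (PySem.List.pyGetD P i []) j 0

-- len(ass[0]) raises IndexError on empty ass; Pre_ excludes [], so headD [] is exact.
def has_for_l (ass : List (List Int)) (l : Int) : Bool :=
  let n : Nat := ass.length
  let m : Nat := (ass.headD []).length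
  let B : List (List Bool) := ass.map (fun As => As.map (fun a => decide (a ≥ l)))
  let P0 : List (List Int) := (List.range (n+1)).map (fun _ => (List.range (m+1)).map (fun _ => (0:Int)))
  let P : List (List Int) := (List.range n).foldl (hfl_outer B m) P0
  (PySem.List.pyRange 0 ((n:Int) - l + 1) 1).any (fun i =>
    (PySem.List.pyRange 0 ((m:Int) - l + 1) 1).any (fun j =>
      decide (hfl_get2 P (i+l) (j+l) - hfl_get2 P i (j+l) - hfl_get2 P (i+l) j + hfl_get2 P i j = l*l)))

-- ===== PORT B =====
-- ass[i+di][j+dj] is read with pyGetD; exact for the in-range indices Pre_ guarantees.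
def has_for_l_alt (ass : List (List Int)) (l : Int) : Bool :=
  let n : Nat := ass.length
  let m : Nat := (ass.headD []).length
  (PySem.List.pyRange 0 ((n:Int) - l + 1) 1).any (fun i =>
    (PySem.List.pyRange 0 ((m:Int) - l + 1) 1).any (fun j =>
      (PySem.List.pyRange 0 l 1).all (fun di =>
        (PySem.List.pyRange 0 l 1).all (fun dj =>
          decide (PySem.List.pyGetD (PySem.List.pyGetD ass (i+di) []) (j+dj) 0 ≥ l)))))

-- ===== PRECONDITION & SPEC =====
-- Pre_ excludes: empty ass (len(ass[0]) raises IndexError), ragged matrices with a row shorter than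
-- row 0 (B[i][j] raises IndexError), and negative l, on which A raises IndexError for all but tiny
-- shapes (on the 1×1 matrix with l = -1 negative-index wraparound makes A accidentally return True).
def Pre_has_for_l (ass : List (List Int)) (l : Int) : Prop :=
  ass ≠ [] ∧ 0 ≤ l ∧ ∀ row ∈ ass, (ass.headD []).length ≤ row.length
instance (ass : List (List Int)) (l : Int) : Decidable (Pre_has_for_l ass l) := by
  unfold Pre_has_for_l; infer_instance

def pvWitness_has_for_l : List (List Int) × Int := ([[1, 2], [3, 4]], 1)

def Spec_has_for_l (ass : List (List Int)) (l : Int) (out : Bool) : Prop := out = has_for_l_alt ass l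
instance (ass : List (List Int)) (l : Int) (out : Bool) : Decidable (Spec_has_for_l ass l out) := by
  unfold Spec_has_for_l; infer_instance

-- ===== CLAIM (what is proved, stated in full; the proofs are below) =====
def Claim_equal_has_for_l : Prop := ∀ (ass : List (List Int)) (l : Int), Dom_has_for_l ass l → Pre_has_for_l ass l → Spec_has_for_l ass l (has_for_l ass l)

-- ===== LEMMAS AND PROOFS =====

-- 0/1 value of cell (r,c) of A's boolean matrix B, as an Int.
def pvb (ass : List (List Int)) (l : Int) (r c : Nat) : Int :=
  if (ass.getD r []).getD c 0 ≥ l then 1 else 0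

-- the mathematical 2D prefix count A's table holds
def pvcnt (ass : List (List Int)) (l : Int) (R C : Nat) : Int :=
  ∑ r ∈ Finset.range R, ∑ c ∈ Finset.range C, pvb ass l r c

-- invariant of the table after the first k outer iterations
def pvInvO (ass : List (List Int)) (l : Int) (P : List (List Int)) (k : Nat) : Prop :=
  P.length = ass.length + 1 ∧
  (∀ r ≤ ass.length, (P.getD r []).length = (ass.headD []).length + 1) ∧
  (∀ r ≤ ass.length, ∀ c ≤ (ass.headD []).length,
    (P.getD r []).getD c 0 = if r ≤ k then pvcnt ass l r c else 0)

-- invariant inside outer iteration i, after the first j inner iterations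
def pvInvJ (ass : List (List Int)) (l : Int) (i : Nat) (P : List (List Int)) (j : Nat) : Prop :=
  P.length = ass.length + 1 ∧
  (∀ r ≤ ass.length, (P.getD r []).length = (ass.headD []).length + 1) ∧
  (∀ r ≤ ass.length, ∀ c ≤ (ass.headD []).length,
    (P.getD r []).getD c 0 =
      if r ≤ i then pvcnt ass l r c else if r = i + 1 ∧ c ≤ j then pvcnt ass l r c else 0)

lemma foldl_range_inv {σ : Type} (f : σ → Nat → σ) (Inv : Nat → σ → Prop) (s : σ) (k : Nat)
    (h0 : Inv 0 s) (hs : ∀ i t, i < k → Inv i t → Inv (i+1) (f t i)) :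
    Inv k ((List.range k).foldl f s) := by
  induction k with
  | zero => simpa using h0
  | succ k ih =>
    rw [List.range_succ, List.foldl_append]
    exact hs k _ (Nat.lt_succ_self k) (ih (fun i t hi => hs i t (Nat.lt_succ_of_lt hi)))

lemma pvgetD_set {α : Type} (xs : List α) (a : Nat) (v d : α) (ha : a < xs.length) (c : Nat) :
    (xs.set a v).getD c d = if a = c then v else xs.getD c d := by
  simp only [List.getD_eq_getElem?_getD, List.getElem?_set]
  split_ifs with h1 <;> simp

lemma pvcnt_zero_col (ass : List (List Int)) (l : Int) (R : Nat) : pvcnt ass l R 0 = 0 := by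
  simp [pvcnt]

lemma pvcnt_succ_row (ass : List (List Int)) (l : Int) (R C : Nat) :
    pvcnt ass l (R+1) C = pvcnt ass l R C + ∑ c ∈ Finset.range C, pvb ass l R c := by
  simp [pvcnt, Finset.sum_range_succ]

-- the table recurrence is exactly pvcnt's recurrence
lemma pvcnt_rect (ass : List (List Int)) (l : Int) (i j : Nat) :
    pvcnt ass l i (j+1) + pvcnt ass l (i+1) j - pvcnt ass l i j + pvb ass l i j
      = pvcnt ass l (i+1) (j+1) := by
  have h1 := pvcnt_succ_row ass l i (j+1)
  have h2 := pvcnt_succ_row ass l i j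
  have h3 := Finset.sum_range_succ (pvb ass l i) j
  linarith

-- B's entry (i,j) as a boolean, for in-range i j on a non-ragged matrix
lemma pvB_entry (ass : List (List Int)) (l : Int) (i j : Nat)
    (hi : i < ass.length) (hj : j < (ass.headD []).length)
    (hrow : ∀ row ∈ ass, (ass.headD []).length ≤ row.length) :
    ((ass.map (fun As => As.map (fun a => decide (a ≥ l)))).getD i []).getD j false
      = decide ((ass.getD i []).getD j 0 ≥ l) := by
  have hi' : i < (ass.map (fun As => As.map (fun a => decide (a ≥ l)))).length := by
    simpa using hi
  rw [List.getD_eq_getElem _ _ hi', List.getElem_map]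
  have hjr : j < ass[i].length :=
    lt_of_lt_of_le hj (hrow _ (List.getElem_mem hi))
  have hj' : j < (ass[i].map (fun a => decide (a ≥ l))).length := by simpa using hjr
  rw [List.getD_eq_getElem _ _ hj', List.getElem_map,
      List.getD_eq_getElem _ _ hi, List.getD_eq_getElem _ _ hjr]

lemma pvInvO_init (ass : List (List Int)) (l : Int) :
    pvInvO ass l ((List.range (ass.length+1)).map
      (fun _ => (List.range ((ass.headD []).length+1)).map (fun _ => (0:Int)))) 0 := by
  have hrep : ∀ (k : Nat), (List.range k).map (fun _ => (List.range ((ass.headD []).length+1)).map (fun _ => (0:Int))) = List.replicate k ((List.range ((ass.headD []).length+1)).map (fun _ => (0:Int))) := by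
    intro k; simp
  rw [hrep]
  have hget : ∀ r ≤ ass.length,
      ((List.replicate (ass.length+1) ((List.range ((ass.headD []).length+1)).map (fun _ => (0:Int)))).getD r [])
        = (List.range ((ass.headD []).length+1)).map (fun _ => (0:Int)) := by
    intro r hr
    rw [List.getD_eq_getElem _ _ (by simp only [List.length_replicate]; omega)]
    exact List.getElem_replicate _
  refine ⟨by simp, ?_, ?_⟩
  · intro r hr; rw [hget r hr]; simp
  · intro r hr c hc
    rw [hget r hr]
    rw [List.getD_eq_getElem _ _ (by simp only [List.length_map, List.length_range]; omega)]
    simp only [List.getElem_map]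
    rcases Nat.eq_zero_or_pos r with h0 | h0
    · subst h0; simp [pvcnt]
    · simp [Nat.not_le.mpr h0]

lemma pvInvJ_step (ass : List (List Int)) (l : Int) (i j : Nat)
    (hi : i < ass.length) (hj : j < (ass.headD []).length)
    (hrow : ∀ row ∈ ass, (ass.headD []).length ≤ row.length)
    (P : List (List Int)) (h : pvInvJ ass l i P j) :
    pvInvJ ass l i (hfl_inner (ass.map (fun As => As.map (fun a => decide (a ≥ l)))) i P j) (j+1) := by
  obtain ⟨hlen, hrlen, hval⟩ := h
  have hi1 : i + 1 ≤ ass.length := hi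
  have hrP : i + 1 < P.length := by omega
  have hcP : j + 1 < (P.getD (i+1) []).length := by rw [hrlen (i+1) hi1]; omega
  have hA : (P.getD i []).getD (j+1) 0 = pvcnt ass l i (j+1) := by
    rw [hval i (by omega) (j+1) (by omega)]; simp
  have hB : (P.getD (i+1) []).getD j 0 = pvcnt ass l (i+1) j := by
    rw [hval (i+1) hi1 j (by omega)]
    have h1 : ¬ (i + 1 ≤ i) := by omega
    simp [h1]
  have hC : (P.getD i []).getD j 0 = pvcnt ass l i j := by
    rw [hval i (by omega) j (by omega)]; simp
  have hD : (if ((ass.map (fun As => As.map (fun a => decide (a ≥ l)))).getD i []).getD j false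
      then (1:Int) else 0) = pvb ass l i j := by
    rw [pvB_entry ass l i j hi hj hrow]
    simp [pvb]
  have hnew : (P.getD i []).getD (j+1) 0 + (P.getD (i+1) []).getD j 0 - (P.getD i []).getD j 0
      + (if ((ass.map (fun As => As.map (fun a => decide (a ≥ l)))).getD i []).getD j false then (1:Int) else 0)
      = pvcnt ass l (i+1) (j+1) := by
    rw [hA, hB, hC, hD]; exact pvcnt_rect ass l i j
  refine ⟨by simp [hfl_inner, hlen], ?_, ?_⟩
  · intro r hr
    simp only [hfl_inner]
    rw [pvgetD_set P (i+1) _ [] hrP r]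
    by_cases he : i + 1 = r
    · rw [if_pos he, List.length_set]
      exact hrlen (i+1) hi1
    · rw [if_neg he]
      exact hrlen r hr
  · intro r hr c hc
    simp only [hfl_inner]
    rw [pvgetD_set P (i+1) _ [] hrP r]
    by_cases he : i + 1 = r
    · subst he
      rw [if_pos rfl]
      rw [pvgetD_set _ (j+1) _ 0 hcP c]
      have h1 : ¬ (i + 1 ≤ i) := by omega
      by_cases hce : j + 1 = c
      · rw [if_pos hce, hnew, ← hce]
        rw [if_neg h1, if_pos ⟨rfl, le_refl _⟩]
      · rw [if_neg hce, hval (i+1) hr c hc]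
        rw [if_neg h1, if_neg h1]
        have hcj : (i + 1 = i + 1 ∧ c ≤ j) ↔ (i + 1 = i + 1 ∧ c ≤ j + 1) := by
          constructor <;> (rintro ⟨_, h⟩; exact ⟨rfl, by omega⟩)
        by_cases hc2 : c ≤ j
        · rw [if_pos ⟨rfl, hc2⟩, if_pos ⟨rfl, by omega⟩]
        · rw [if_neg (by simp [hc2]), if_neg (by simp; omega)]
    · rw [if_neg he, hval r hr c hc]
      have hrne : r ≠ i + 1 := fun hh => he hh.symm
      by_cases hri : r ≤ i
      · rw [if_pos hri, if_pos hri]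
      · rw [if_neg hri, if_neg hri, if_neg (by simp [hrne]), if_neg (by simp [hrne])]

lemma pvInvO_final (ass : List (List Int)) (l : Int)
    (hrow : ∀ row ∈ ass, (ass.headD []).length ≤ row.length) :
    pvInvO ass l
      ((List.range ass.length).foldl
        (hfl_outer (ass.map (fun As => As.map (fun a => decide (a ≥ l)))) (ass.headD []).length)
        ((List.range (ass.length+1)).map
          (fun _ => (List.range ((ass.headD []).length+1)).map (fun _ => (0:Int)))))
      ass.length := by
  refine foldl_range_inv _ (fun k t => pvInvO ass l t k) _ _ (pvInvO_init ass l) ?_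
  intro i P hi hP
  -- inner loop: from pvInvJ i P 0 to pvInvJ i _ m
  have h0 : pvInvJ ass l i P 0 := by
    obtain ⟨h1, h2, h3⟩ := hP
    refine ⟨h1, h2, ?_⟩
    intro r hr c hc
    rw [h3 r hr c hc]
    split_ifs with ha hb
    · rfl
    · obtain ⟨hb1, hb2⟩ := hb
      have : c = 0 := by omega
      subst this
      rw [pvcnt_zero_col]
    · rfl
  have hm : pvInvJ ass l i (hfl_outer (ass.map (fun As => As.map (fun a => decide (a ≥ l))))
      (ass.headD []).length P i) (ass.headD []).length := by
    unfold hfl_outer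
    refine foldl_range_inv _ (fun j t => pvInvJ ass l i t j) _ _ h0 ?_
    intro j Q hj hQ
    exact pvInvJ_step ass l i j hi hj hrow Q hQ
  obtain ⟨h1, h2, h3⟩ := hm
  refine ⟨h1, h2, ?_⟩
  intro r hr c hc
  rw [h3 r hr c hc]
  by_cases ha : r ≤ i
  · rw [if_pos ha, if_pos (by omega)]
  · by_cases hb : r = i + 1
    · rw [if_neg ha, if_pos ⟨hb, hc⟩, if_pos (by omega)]
    · rw [if_neg ha, if_neg (by simp [hb]), if_neg (by omega)]

-- the 0/1 window sum equals L*L iff every window entry is ≥ l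
lemma pvwindow_iff (ass : List (List Int)) (l : Int) (iN jN L : Nat) (hl : l = (L : Int)) :
    (pvcnt ass l (iN+L) (jN+L) - pvcnt ass l iN (jN+L) - pvcnt ass l (iN+L) jN + pvcnt ass l iN jN
        = l * l)
      ↔ ∀ t < L, ∀ u < L, (ass.getD (iN+t) []).getD (jN+u) 0 ≥ l := by
  have hreg : pvcnt ass l (iN+L) (jN+L) - pvcnt ass l iN (jN+L) - pvcnt ass l (iN+L) jN
      + pvcnt ass l iN jN
      = ∑ r ∈ Finset.Ico iN (iN+L), ∑ c ∈ Finset.Ico jN (jN+L), pvb ass l r c := by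
    have hr : ∀ r, ∑ c ∈ Finset.Ico jN (jN+L), pvb ass l r c
        = (∑ c ∈ Finset.range (jN+L), pvb ass l r c) - ∑ c ∈ Finset.range jN, pvb ass l r c :=
      fun r => Finset.sum_Ico_eq_sub _ (by omega)
    rw [Finset.sum_congr rfl (fun r _ => hr r), Finset.sum_sub_distrib,
        Finset.sum_Ico_eq_sub _ (by omega : iN ≤ iN + L),
        Finset.sum_Ico_eq_sub _ (by omega : iN ≤ iN + L)]
    simp only [pvcnt]
    ring
  rw [hreg]
  have hb01 : ∀ r c, pvb ass l r c ≤ 1 := by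
    intro r c; unfold pvb; split_ifs <;> omega
  have hinner_le : ∀ r, ∑ c ∈ Finset.Ico jN (jN+L), pvb ass l r c ≤ (L : Int) := by
    intro r
    calc ∑ c ∈ Finset.Ico jN (jN+L), pvb ass l r c
        ≤ ∑ _c ∈ Finset.Ico jN (jN+L), (1:Int) := Finset.sum_le_sum (fun c _ => hb01 r c)
      _ = (L : Int) := by simp
  have hLL : l * l = ∑ _r ∈ Finset.Ico iN (iN+L), (L : Int) := by
    simp [hl, Finset.sum_const, Nat.card_Ico]
  rw [hLL]
  rw [Finset.sum_eq_sum_iff_of_le (fun r _ => hinner_le r)]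
  constructor
  · intro h t ht u hu
    have hrmem : iN + t ∈ Finset.Ico iN (iN+L) := by simp [Finset.mem_Ico]; omega
    have h2 := h _ hrmem
    have hL : (L : Int) = ∑ _c ∈ Finset.Ico jN (jN+L), (1:Int) := by simp
    rw [hL, Finset.sum_eq_sum_iff_of_le (fun c _ => hb01 _ c)] at h2
    have hcmem : jN + u ∈ Finset.Ico jN (jN+L) := by simp [Finset.mem_Ico]; omega
    have h3 := h2 _ hcmem
    unfold pvb at h3
    by_contra hcon
    rw [if_neg hcon] at h3
    omega
  · intro h r hr
    have hL : (L : Int) = ∑ _c ∈ Finset.Ico jN (jN+L), (1:Int) := by simp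
    rw [hL, Finset.sum_eq_sum_iff_of_le (fun c _ => hb01 _ c)]
    intro c hcmem
    rw [Finset.mem_Ico] at hr hcmem
    have := h (r - iN) (by omega) (c - jN) (by omega)
    have hr' : iN + (r - iN) = r := by omega
    have hc' : jN + (c - jN) = c := by omega
    rw [hr', hc'] at this
    unfold pvb
    rw [if_pos this]

-- ===== VERDICT (by name: the statement is the Claim_ definition above) =====
theorem has_for_l_spec : Claim_equal_has_for_l := by
  intro ass l _ hPre
  obtain ⟨hne, hl, hrow⟩ := hPre
  unfold Spec_has_for_l
  simp only [has_for_l, has_for_l_alt]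
  refine PySem.List.any_congr_mem ?_
  intro i hi
  refine PySem.List.any_congr_mem ?_
  intro j hj
  rw [PySem.List.mem_pyRange_one] at hi hj
  -- name the pieces
  set n := ass.length with hn
  set m := (ass.headD []).length with hm
  set L := l.toNat with hL
  have hlL : l = (L : Int) := by omega
  set iN := i.toNat with hiN
  set jN := j.toNat with hjN
  have hiI : i = (iN : Int) := by omega
  have hjI : j = (jN : Int) := by omega
  have hiLn : iN + L ≤ n := by omega
  have hjLm : jN + L ≤ m := by omega
  have hInv := pvInvO_final ass l hrow
  have hget : ∀ (r c : Nat), r ≤ n → c ≤ m →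
      hfl_get2 ((List.range n).foldl
        (hfl_outer (ass.map (fun As => As.map (fun a => decide (a ≥ l)))) m)
        ((List.range (n+1)).map (fun _ => (List.range (m+1)).map (fun _ => (0:Int)))))
        (r : Int) (c : Int) = pvcnt ass l r c := by
    intro r c hr hc
    obtain ⟨_, _, h3⟩ := hInv
    unfold hfl_get2
    simp only [PySem.List.pyGetD_natCast]
    rw [h3 r hr c hc, if_pos hr]
  -- rewrite all four corner reads
  have e1 : i + l = ((iN + L : Nat) : Int) := by push_cast; omega
  have e2 : j + l = ((jN + L : Nat) : Int) := by push_cast; omega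
  rw [Bool.eq_iff_iff]
  rw [e1, e2, hiI, hjI]
  rw [decide_eq_true_iff]
  rw [hget _ _ hiLn hjLm, hget _ _ (by omega) hjLm, hget _ _ hiLn (by omega),
      hget _ _ (by omega) (by omega)]
  rw [pvwindow_iff ass l iN jN L hlL]
  -- unfold B's window check
  rw [PySem.List.pyRange_one 0 l]
  have hsub : (l - 0).toNat = L := by omega
  rw [hsub]
  simp only [List.all_map, Function.comp, List.all_eq_true, List.mem_range]
  have et : ∀ t : Nat, (iN : Int) + (0 + (t : Int)) = ((iN + t : Nat) : Int) := by
    intro t; push_cast; ring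
  have eu : ∀ u : Nat, (jN : Int) + (0 + (u : Int)) = ((jN + u : Nat) : Int) := by
    intro u; push_cast; ring
  constructor
  · intro h t ht u hu
    rw [decide_eq_true_iff]
    rw [et t, eu u, PySem.List.pyGetD_natCast, PySem.List.pyGetD_natCast]
    exact h t ht u hu
  · intro h t ht u hu
    have h2 := h t ht u hu
    rw [decide_eq_true_iff] at h2
    rw [et t, eu u, PySem.List.pyGetD_natCast, PySem.List.pyGetD_natCast] at h2
    exact h2
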